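-- pv_equiv track=rewrite | github.com/GyroSuperintelligence/BabyLM | toys/console/utils.py | validate_uuid_format
-- ===== SOURCE A (Python) =====
-- def validate_uuid_format(uuid_str: str) -> bool:
--     """Validate UUID format."""
--     if not uuid_str or not isinstance(uuid_str, str):
--         return False
--
--     # Basic UUID format check: 8-4-4-4-12 characters with hyphens
--     parts = uuid_str.split('-')
--     if len(parts) != 5:
--         return False
--
--     expected_lengths = [8, 4, 4, 4, 12]
--     for part, expected_length in zip(parts, expected_lengths):
--         if len(part) != expected_length or not all(c in '0123456789abcdefABCDEF' for c in part):
--             return False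
--
--     return True
-- ===== SOURCE B (Python) =====
-- def validate_uuid_format(uuid_str: str) -> bool:
--     """Validate UUID format by a single positional scan."""
--     if not uuid_str or not isinstance(uuid_str, str):
--         return False
--     if len(uuid_str) != 36:
--         return False
--     for i, c in enumerate(uuid_str):
--         if i in (8, 13, 18, 23):
--             if c != '-':
--                 return False
--         elif c not in '0123456789abcdefABCDEF':
--             return False
--     return True
-- ===== Notes on version B (the rewrite author's own statement) =====
-- stated objective: alternative
-- what changed: B replaces split-on-hyphen into 5 parts with per-part length and hex checks by one length==36 test plus a single positional scan requiring a hyphen at indices 8/13/18/23 and a hex digit everywhere else.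
import Mathlib
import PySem

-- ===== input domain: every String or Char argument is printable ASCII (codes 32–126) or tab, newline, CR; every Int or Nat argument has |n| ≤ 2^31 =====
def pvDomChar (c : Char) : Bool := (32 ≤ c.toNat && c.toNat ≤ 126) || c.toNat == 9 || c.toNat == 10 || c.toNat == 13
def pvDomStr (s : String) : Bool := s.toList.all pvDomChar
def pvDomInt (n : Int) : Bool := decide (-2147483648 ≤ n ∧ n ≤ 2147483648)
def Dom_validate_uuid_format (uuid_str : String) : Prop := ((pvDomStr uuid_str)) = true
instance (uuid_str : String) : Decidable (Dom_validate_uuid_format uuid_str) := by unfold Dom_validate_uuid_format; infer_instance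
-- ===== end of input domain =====

-- B validates a UUID by one positional scan (hyphen at indices 8/13/18/23, hex elsewhere) instead of A's split into 5 parts; alternative decomposition, same cost.


-- shared constant: the characters of '0123456789abcdefABCDEF' (both Pythons test membership in this string)
def pvIsHexDigit (c : Char) : Bool :=
  ['0','1','2','3','4','5','6','7','8','9','a','b','c','d','e','f','A','B','C','D','E','F'].elem c

-- ===== PORT A =====
def validate_uuid_format (uuid_str : String) : Bool :=
  -- `not uuid_str` is emptiness; `isinstance(uuid_str, str)` is always true under the type convention
  if uuid_str.toList = [] then false
  else
    let parts := PySem.Chars.splitOn uuid_str.toList ['-']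
    if parts.length ≠ 5 then false
    else
      (parts.zip [8, 4, 4, 4, 12]).all fun pe =>
        decide (pe.1.length = pe.2) && pe.1.all pvIsHexDigit

-- ===== PORT B =====
-- the `for i, c in enumerate(uuid_str)` loop with early returns, as structural recursion carrying the index
def pvScanB : Nat → List Char → Bool
  | _, [] => true
  | i, c :: rest =>
    if i = 8 ∨ i = 13 ∨ i = 18 ∨ i = 23 then
      if c = '-' then pvScanB (i + 1) rest else false
    else
      if pvIsHexDigit c then pvScanB (i + 1) rest else false

def validate_uuid_format_alt (uuid_str : String) : Bool :=
  if uuid_str.toList = [] then false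
  else if uuid_str.toList.length ≠ 36 then false
  else pvScanB 0 uuid_str.toList

-- ===== PRECONDITION & SPEC =====
def Spec_validate_uuid_format (uuid_str : String) (out : Bool) : Prop := out = validate_uuid_format_alt uuid_str
instance (uuid_str : String) (out : Bool) : Decidable (Spec_validate_uuid_format uuid_str out) := by unfold Spec_validate_uuid_format; infer_instance

-- ===== CLAIM (what is proved, stated in full; the proofs are below) =====
def Claim_equal_validate_uuid_format : Prop := ∀ (uuid_str : String), Dom_validate_uuid_format uuid_str → Spec_validate_uuid_format uuid_str (validate_uuid_format uuid_str)

-- ===== LEMMAS AND PROOFS =====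

-- simple structural model of str.split('-')
def pvSplit1 (l : List Char) (cur : List Char) : List (List Char) :=
  match l with
  | [] => [cur.reverse]
  | c :: rest => if c = '-' then cur.reverse :: pvSplit1 rest [] else pvSplit1 rest (c :: cur)

theorem pvSplitOn_go_eq (l : List Char) : ∀ (fuel : Nat) (cur : List Char) (acc : List (List Char)),
    l.length < fuel →
    PySem.Chars.splitOn.go ['-'] fuel l cur acc = acc.reverse ++ pvSplit1 l cur := by
  induction l with
  | nil =>
    intro fuel cur acc hf
    match fuel, hf with
    | fuel + 1, _ => simp [PySem.Chars.splitOn.go, pvSplit1]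
  | cons c rest ih =>
    intro fuel cur acc hf
    match fuel, hf with
    | fuel + 1, hf =>
      simp only [PySem.Chars.splitOn.go, List.isPrefixOf, Bool.and_true]
      by_cases hc : c = '-'
      · subst hc
        rw [if_pos (by simp)]
        rw [show List.drop ['-'].length ('-' :: rest) = rest from rfl]
        rw [ih fuel [] (cur.reverse :: acc) (by simpa using Nat.lt_of_succ_lt_succ hf)]
        simp [pvSplit1]
      · rw [if_neg (by simp [beq_iff_eq]; exact fun h => (hc h.symm).elim)]
        rw [ih fuel (c :: cur) acc (Nat.lt_of_succ_lt_succ hf)]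
        simp [pvSplit1, hc]

theorem pvSplitOn_eq (l : List Char) :
    PySem.Chars.splitOn l ['-'] = pvSplit1 l [] := by
  rw [PySem.Chars.splitOn, pvSplitOn_go_eq l (l.length + 1) [] [] (Nat.lt_succ_self _)]
  rfl

def pvJoinDash : List (List Char) → List Char
  | [] => []
  | [p] => p
  | p :: q :: ps => p ++ '-' :: pvJoinDash (q :: ps)

theorem pvSplit1_ne_nil (l cur : List Char) : pvSplit1 l cur ≠ [] := by
  induction l generalizing cur with
  | nil => simp [pvSplit1]
  | cons c rest ih =>
    simp only [pvSplit1]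
    split <;> simp [ih]

theorem pvJoinDash_pvSplit1 (l : List Char) : ∀ cur, pvJoinDash (pvSplit1 l cur) = cur.reverse ++ l := by
  induction l with
  | nil => intro cur; simp [pvSplit1, pvJoinDash]
  | cons c rest ih =>
    intro cur
    simp only [pvSplit1]
    by_cases hc : c = '-'
    · subst hc
      rw [if_pos rfl]
      obtain ⟨q, qs, hq⟩ := List.exists_cons_of_ne_nil (pvSplit1_ne_nil rest [])
      rw [hq, pvJoinDash, ← hq, ih []]
      simp
    · rw [if_neg hc, ih (c :: cur)]
      simp

theorem pv_hex_ne_dash {c : Char} (h : pvIsHexDigit c = true) : c ≠ '-' := by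
  intro hc; subst hc; simp [pvIsHexDigit] at h

theorem pv_no_dash_of_all_hex {p : List Char} (h : p.all pvIsHexDigit = true) : '-' ∉ p := by
  intro hm
  exact pv_hex_ne_dash (List.all_eq_true.mp h _ hm) rfl

theorem pvSplit1_no_dash {a : List Char} (ha : '-' ∉ a) : ∀ cur, pvSplit1 a cur = [cur.reverse ++ a] := by
  induction a with
  | nil => intro cur; simp [pvSplit1]
  | cons c rest ih =>
    intro cur
    have hc : c ≠ '-' := fun h => ha (h ▸ List.mem_cons_self ..)
    rw [pvSplit1, if_neg hc, ih (fun h => ha (List.mem_cons_of_mem _ h)) (c :: cur)]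
    simp

theorem pvSplit1_no_dash_append {a : List Char} (ha : '-' ∉ a) :
    ∀ (cur rest : List Char), pvSplit1 (a ++ '-' :: rest) cur = (cur.reverse ++ a) :: pvSplit1 rest [] := by
  induction a with
  | nil => intro cur rest; simp [pvSplit1]
  | cons c t ih =>
    intro cur rest
    have hc : c ≠ '-' := fun h => ha (h ▸ List.mem_cons_self ..)
    rw [List.cons_append, pvSplit1, if_neg hc, ih (fun h => ha (List.mem_cons_of_mem _ h)) (c :: cur) rest]
    simp

-- the common characterisation: "l is of UUID shape"
def pvS (l : List Char) : Prop :=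
  ∃ p0 p1 p2 p3 p4 : List Char,
    l = p0 ++ '-' :: (p1 ++ '-' :: (p2 ++ '-' :: (p3 ++ '-' :: p4))) ∧
    p0.length = 8 ∧ p1.length = 4 ∧ p2.length = 4 ∧ p3.length = 4 ∧ p4.length = 12 ∧
    (p0 ++ p1 ++ p2 ++ p3 ++ p4).all pvIsHexDigit = true

theorem pvA_iff (s : String) : validate_uuid_format s = true ↔ pvS s.toList := by
  constructor
  · intro h
    simp only [validate_uuid_format, pvSplitOn_eq] at h
    split_ifs at h with h0 h5
    have h5' : (pvSplit1 s.toList []).length = 5 := not_not.mp h5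
    generalize hP : pvSplit1 s.toList [] = P at h h5'
    have hjoin := pvJoinDash_pvSplit1 s.toList []
    rw [hP] at hjoin
    rcases P with _|⟨q0,_|⟨q1,_|⟨q2,_|⟨q3,_|⟨q4,_|⟨q5,P⟩⟩⟩⟩⟩⟩ <;>
      simp only [List.length_cons, List.length_nil] at h5' <;> try omega
    simp only [List.zip, List.zipWith, List.all_cons, List.all_nil, Bool.and_eq_true,
      decide_eq_true_eq, Bool.and_true] at h
    obtain ⟨⟨l0, a0⟩, ⟨l1, a1⟩, ⟨l2, a2⟩, ⟨l3, a3⟩, ⟨l4, a4⟩⟩ := h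
    simp only [pvJoinDash, List.reverse_nil, List.nil_append] at hjoin
    exact ⟨q0, q1, q2, q3, q4, hjoin.symm, l0, l1, l2, l3, l4,
      by simp [List.all_append, a0, a1, a2, a3, a4]⟩
  · rintro ⟨p0, p1, p2, p3, p4, hl, h0, h1, h2, h3, h4, hall⟩
    simp only [List.all_append, Bool.and_eq_true] at hall
    obtain ⟨⟨⟨⟨a0, a1⟩, a2⟩, a3⟩, a4⟩ := hall
    simp only [validate_uuid_format, pvSplitOn_eq, hl]
    rw [if_neg (by simp)]
    rw [pvSplit1_no_dash_append (pv_no_dash_of_all_hex a0),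
        pvSplit1_no_dash_append (pv_no_dash_of_all_hex a1),
        pvSplit1_no_dash_append (pv_no_dash_of_all_hex a2),
        pvSplit1_no_dash_append (pv_no_dash_of_all_hex a3),
        pvSplit1_no_dash (pv_no_dash_of_all_hex a4)]
    simp [List.zip, List.zipWith, h0, h1, h2, h3, h4, a0, a1, a2, a3, a4]

theorem pvScanB_seg (p : List Char) : ∀ (i : Nat) (rest : List Char),
    p.all pvIsHexDigit = true →
    (∀ j, i ≤ j → j < i + p.length → ¬(j = 8 ∨ j = 13 ∨ j = 18 ∨ j = 23)) →
    pvScanB i (p ++ rest) = pvScanB (i + p.length) rest := by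
  induction p with
  | nil => intro i rest _ _; simp
  | cons c t ih =>
    intro i rest hall hsp
    simp only [List.all_cons, Bool.and_eq_true] at hall
    rw [List.cons_append, pvScanB]
    rw [if_neg (hsp i (Nat.le_refl i) (by simp only [List.length_cons]; omega)), if_pos hall.1]
    rw [ih (i + 1) rest hall.2 (fun j h1 h2 => hsp j (by omega) (by simp only [List.length_cons] at h2 ⊢; omega))]
    congr 1
    simp only [List.length_cons]; omega

theorem pvScanB_getElem (l : List Char) : ∀ (i : Nat), pvScanB i l = true →
    ∀ (j : Nat) (hj : j < l.length),
      if i + j = 8 ∨ i + j = 13 ∨ i + j = 18 ∨ i + j = 23 then l[j] = '-'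
      else pvIsHexDigit l[j] = true := by
  induction l with
  | nil => intro i _ j hj; simp at hj
  | cons c rest ih =>
    intro i h j hj
    rw [pvScanB] at h
    rcases j with _ | j
    · simp only [List.getElem_cons_zero, Nat.add_zero]
      split_ifs with hsp
      · rw [if_pos hsp] at h
        by_cases hc : c = '-'
        · exact hc
        · rw [if_neg hc] at h; exact absurd h (by simp)
      · rw [if_neg hsp] at h
        by_cases hc : pvIsHexDigit c = true
        · exact hc
        · rw [if_neg hc] at h; exact absurd h (by simp)
    · have hrec : pvScanB (i + 1) rest = true := by
        split_ifs at h
        all_goals exact h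
      have := ih (i + 1) hrec j (by simpa using Nat.lt_of_succ_lt_succ hj)
      simp only [List.getElem_cons_succ]
      convert this using 2 <;> omega

theorem pvB_iff (s : String) : validate_uuid_format_alt s = true ↔ pvS s.toList := by
  constructor
  · intro h
    simp only [validate_uuid_format_alt] at h
    split_ifs at h with h0 h36
    have hlen : s.toList.length = 36 := not_not.mp h36
    have g := pvScanB_getElem s.toList 0 h
    simp only [Nat.zero_add] at g
    set l := s.toList with hls
    have gd : ∀ j (hj : j < l.length), (j = 8 ∨ j = 13 ∨ j = 18 ∨ j = 23) → l[j] = '-' := by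
      intro j hj hsp
      have := g j hj
      rwa [if_pos hsp] at this
    have gh : ∀ j (hj : j < l.length), ¬(j = 8 ∨ j = 13 ∨ j = 18 ∨ j = 23) → pvIsHexDigit l[j] = true := by
      intro j hj hsp
      have := g j hj
      rwa [if_neg hsp] at this
    have hseg : ∀ (a b : Nat), a + b ≤ 36 → (∀ j, a ≤ j → j < a + b → ¬(j = 8 ∨ j = 13 ∨ j = 18 ∨ j = 23)) →
        ((l.drop a).take b).all pvIsHexDigit = true := by
      intro a b hab hsp
      rw [List.all_eq_true]
      intro x hx
      obtain ⟨j, hj, rfl⟩ := List.mem_iff_getElem.mp hx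
      have hj' : j < b := by
        have := hj
        simp only [List.length_take, List.length_drop, hlen] at this
        omega
      rw [List.getElem_take, List.getElem_drop]
      exact gh (a + j) (by omega) (fun hc => hsp (a + j) (by omega) (by omega) hc)
    have d8 : l.drop 8 = '-' :: l.drop 9 := by
      rw [List.drop_eq_getElem_cons (by omega)]
      rw [gd 8 (by omega) (by omega)]
    have d13 : l.drop 13 = '-' :: l.drop 14 := by
      rw [List.drop_eq_getElem_cons (by omega)]
      rw [gd 13 (by omega) (by omega)]
    have d18 : l.drop 18 = '-' :: l.drop 19 := by
      rw [List.drop_eq_getElem_cons (by omega)]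
      rw [gd 18 (by omega) (by omega)]
    have d23 : l.drop 23 = '-' :: l.drop 24 := by
      rw [List.drop_eq_getElem_cons (by omega)]
      rw [gd 23 (by omega) (by omega)]
    refine ⟨l.take 8, (l.drop 9).take 4, (l.drop 14).take 4, (l.drop 19).take 4, l.drop 24,
      ?_, ?_, ?_, ?_, ?_, ?_, ?_⟩
    · calc l = l.take 8 ++ l.drop 8 := (List.take_append_drop 8 l).symm
        _ = l.take 8 ++ '-' :: l.drop 9 := by rw [d8]
        _ = l.take 8 ++ '-' :: ((l.drop 9).take 4 ++ (l.drop 9).drop 4) := by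
              rw [List.take_append_drop]
        _ = l.take 8 ++ '-' :: ((l.drop 9).take 4 ++ '-' :: l.drop 14) := by
              rw [List.drop_drop]; norm_num [d13]
        _ = l.take 8 ++ '-' :: ((l.drop 9).take 4 ++ '-' :: ((l.drop 14).take 4 ++ (l.drop 14).drop 4)) := by
              rw [List.take_append_drop]
        _ = l.take 8 ++ '-' :: ((l.drop 9).take 4 ++ '-' :: ((l.drop 14).take 4 ++ '-' :: l.drop 19)) := by
              rw [List.drop_drop]; norm_num [d18]
        _ = l.take 8 ++ '-' :: ((l.drop 9).take 4 ++ '-' :: ((l.drop 14).take 4 ++ '-' :: ((l.drop 19).take 4 ++ (l.drop 19).drop 4))) := by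
              rw [List.take_append_drop]
        _ = l.take 8 ++ '-' :: ((l.drop 9).take 4 ++ '-' :: ((l.drop 14).take 4 ++ '-' :: ((l.drop 19).take 4 ++ '-' :: l.drop 24))) := by
              rw [List.drop_drop]; norm_num [d23]
    · simp [hlen]
    · simp [List.length_take, List.length_drop, hlen]
    · simp [List.length_take, List.length_drop, hlen]
    · simp [List.length_take, List.length_drop, hlen]
    · simp [hlen]
    · simp only [List.all_append, Bool.and_eq_true]
      refine ⟨⟨⟨⟨?_, ?_⟩, ?_⟩, ?_⟩, ?_⟩
      · have := hseg 0 8 (by omega) (by omega)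
        simpa using this
      · exact hseg 9 4 (by omega) (by omega)
      · exact hseg 14 4 (by omega) (by omega)
      · exact hseg 19 4 (by omega) (by omega)
      · have := hseg 24 12 (by omega) (by omega)
        rwa [List.take_of_length_le (by simp [hlen])] at this
  · rintro ⟨p0, p1, p2, p3, p4, hl, h0, h1, h2, h3, h4, hall⟩
    simp only [List.all_append, Bool.and_eq_true] at hall
    obtain ⟨⟨⟨⟨a0, a1⟩, a2⟩, a3⟩, a4⟩ := hall
    simp only [validate_uuid_format_alt, hl]
    rw [if_neg (by simp), if_neg (by simp [h0, h1, h2, h3, h4])]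
    have e0 := pvScanB_seg p0 0 ('-' :: (p1 ++ '-' :: (p2 ++ '-' :: (p3 ++ '-' :: p4)))) a0
      (by rw [h0]; omega)
    rw [h0] at e0
    norm_num at e0
    rw [e0, show ∀ X, pvScanB 8 ('-' :: X) = pvScanB 9 X from fun X => by simp [pvScanB]]
    have e1 := pvScanB_seg p1 9 ('-' :: (p2 ++ '-' :: (p3 ++ '-' :: p4))) a1 (by rw [h1]; omega)
    rw [h1] at e1
    norm_num at e1
    rw [e1, show ∀ X, pvScanB 13 ('-' :: X) = pvScanB 14 X from fun X => by simp [pvScanB]]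
    have e2 := pvScanB_seg p2 14 ('-' :: (p3 ++ '-' :: p4)) a2 (by rw [h2]; omega)
    rw [h2] at e2
    norm_num at e2
    rw [e2, show ∀ X, pvScanB 18 ('-' :: X) = pvScanB 19 X from fun X => by simp [pvScanB]]
    have e3 := pvScanB_seg p3 19 ('-' :: p4) a3 (by rw [h3]; omega)
    rw [h3] at e3
    norm_num at e3
    rw [e3, show ∀ X, pvScanB 23 ('-' :: X) = pvScanB 24 X from fun X => by simp [pvScanB]]
    have e4 := pvScanB_seg p4 24 [] a4 (by rw [h4]; omega)
    rw [h4, List.append_nil] at e4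
    norm_num at e4
    rw [e4]
    rfl

-- ===== VERDICT (by name: the statement is the Claim_ definition above) =====
theorem validate_uuid_format_spec : Claim_equal_validate_uuid_format := by
  intro s _
  unfold Spec_validate_uuid_format
  have hA := pvA_iff s
  have hB := pvB_iff s
  cases hva : validate_uuid_format s <;> cases hvb : validate_uuid_format_alt s <;> simp_all
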